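-- pv_equiv track=rewrite | github.com/mineoran/Data-Science-Bootcamp | ChessAnalysis.py | shorten_names
-- ===== SOURCE A (Python) =====
-- def shorten_names(opening):
--     if ':' in opening:
--         opening = opening.split(':')[0]
--     while '|' in opening:
--         opening = opening.split('|')[0]
--     if '#' in opening:
--         opening = opening.split('#')[0]
--     if 'Accepted' in opening:
--         opening = opening.replace('Accepted', '')
--     if 'Declined' in opening:
--         opening = opening.replace('Declined', '')
--     if 'Refused' in opening:
--         opening = opening.replace('Refused', '')
--     return opening.strip()
-- ===== SOURCE B (Python) =====
-- def shorten_names(opening):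
--     # one pass to find the single cut point: the earliest of the first ':', '|', '#'
--     cut = len(opening)
--     for d in ':|#':
--         i = opening.find(d)
--         if i != -1 and i < cut:
--             cut = i
--     s = opening[:cut]
--     for w in ('Accepted', 'Declined', 'Refused'):
--         s = s.replace(w, '')
--     return s.strip()
-- ===== Notes on version B (the rewrite author's own statement) =====
-- stated objective: simpler
-- what changed: Replaces the sequential split(':')[0] / while-split('|')[0] / split('#')[0] truncations and the three guarded replace calls with one pass that computes a single minimal cut index over the three delimiters, slices once, then unconditionally strips the three words.
import Mathlib
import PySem

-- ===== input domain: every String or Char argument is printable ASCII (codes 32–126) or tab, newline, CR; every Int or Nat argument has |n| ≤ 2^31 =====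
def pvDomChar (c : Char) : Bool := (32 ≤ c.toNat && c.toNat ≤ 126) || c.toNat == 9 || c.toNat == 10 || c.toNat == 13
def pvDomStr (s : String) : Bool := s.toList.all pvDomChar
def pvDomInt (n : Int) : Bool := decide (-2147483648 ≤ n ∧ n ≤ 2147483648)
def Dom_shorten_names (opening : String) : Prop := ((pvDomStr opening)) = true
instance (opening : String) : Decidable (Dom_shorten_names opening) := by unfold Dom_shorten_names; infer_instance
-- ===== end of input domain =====

-- B truncates at one precomputed minimal delimiter index instead of A's chain of splits; return values proved equal (simpler decomposition, no speed claim).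

-- ===== PORT A =====
-- opening.split(sep)[0]; Python's split never returns an empty list, so the [0] never raises
def pvSplitHead (cs : List Char) (sep : List Char) : List Char :=
  (PySem.Chars.splitOn cs sep).headD []

-- the `while '|' in opening:` loop; the fuel argument (length + 1) only makes the
-- recursion total -- it is never exhausted, since each split strictly shortens the list
def pvPipeLoop : Nat → List Char → List Char
  | 0, cs => cs
  | n + 1, cs =>
      if PySem.Chars.isIn ['|'] cs then pvPipeLoop n (pvSplitHead cs ['|']) else cs

def shorten_names (opening : String) : String :=
  let cs := opening.toList
  let o1 := if PySem.Chars.isIn [':'] cs then pvSplitHead cs [':'] else cs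
  let o2 := pvPipeLoop (o1.length + 1) o1
  let o3 := if PySem.Chars.isIn ['#'] o2 then pvSplitHead o2 ['#'] else o2
  let o4 := if PySem.Chars.isIn "Accepted".toList o3 then PySem.Chars.replace o3 "Accepted".toList [] else o3
  let o5 := if PySem.Chars.isIn "Declined".toList o4 then PySem.Chars.replace o4 "Declined".toList [] else o4
  let o6 := if PySem.Chars.isIn "Refused".toList o5 then PySem.Chars.replace o5 "Refused".toList [] else o5
  String.ofList (PySem.Chars.strip o6)

-- ===== PORT B =====
def shorten_names_alt (opening : String) : String :=
  let cs := opening.toList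
  let cut := [':', '|', '#'].foldl (fun cut d =>
      let i := PySem.Chars.find cs [d]
      if i ≠ -1 ∧ i < cut then i else cut) (cs.length : Int)
  let s := PySem.Chars.slice cs none (some cut)
  let s := ["Accepted".toList, "Declined".toList, "Refused".toList].foldl
      (fun s w => PySem.Chars.replace s w []) s
  String.ofList (PySem.Chars.strip s)

-- ===== PRECONDITION & SPEC =====
def Spec_shorten_names (opening : String) (out : String) : Prop := out = shorten_names_alt opening
instance (opening : String) (out : String) : Decidable (Spec_shorten_names opening out) := by unfold Spec_shorten_names; infer_instance

-- ===== CLAIM (what is proved, stated in full; the proofs are below) =====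
def Claim_equal_shorten_names : Prop := ∀ (opening : String), Dom_shorten_names opening → Spec_shorten_names opening (shorten_names opening)

-- ===== LEMMAS AND PROOFS =====
theorem go_acc_last (d : Char) : ∀ (fuel : Nat) (l cur : List Char) (acc : List (List Char)) (x : List Char),
    (PySem.Chars.splitOn.go [d] fuel l cur (acc ++ [x])).headD [] = x := by
  intro fuel
  induction fuel with
  | zero => intro l cur acc x; rw [PySem.Chars.splitOn.go] <;> simp
  | succ n ih =>
    intro l cur acc x
    cases l with
    | nil => rw [PySem.Chars.splitOn.go] <;> simp
    | cons c rest =>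
      rw [PySem.Chars.splitOn.go]
      split
      · have := ih (List.drop [d].length (c :: rest)) [] (cur.reverse :: acc) x
        simpa using this
      · exact ih rest (c :: cur) acc x

theorem go_head (d : Char) : ∀ (fuel : Nat) (l cur : List Char), l.length ≤ fuel →
    (PySem.Chars.splitOn.go [d] fuel l cur []).headD [] = cur.reverse ++ l.takeWhile (fun c => !(c == d)) := by
  intro fuel
  induction fuel with
  | zero =>
    intro l cur h
    have : l = [] := List.length_eq_zero_iff.mp (Nat.le_zero.mp h)
    subst this; rw [PySem.Chars.splitOn.go] <;> simp
  | succ n ih =>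
    intro l cur h
    cases l with
    | nil => rw [PySem.Chars.splitOn.go] <;> simp
    | cons c rest =>
      rw [PySem.Chars.splitOn.go]
      by_cases hc : c = d
      · have hp : [d].isPrefixOf (c :: rest) = true := by simp [hc]
        rw [if_pos hp]
        have := go_acc_last d n (List.drop [d].length (c :: rest)) [] [] cur.reverse
        simpa [hc] using this
      · have hp : [d].isPrefixOf (c :: rest) = false := by
          simp [List.isPrefixOf]; exact fun hh => hc hh.symm
        rw [hp]
        simp only [Bool.false_eq_true, if_false]
        have := ih rest (c :: cur) (by simpa using Nat.lt_succ_iff.mp (by simpa using h))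
        rw [this]
        simp [hc]

theorem splitHead_single (cs : List Char) (d : Char) :
    (PySem.Chars.splitOn cs [d]).headD [] = cs.takeWhile (fun c => !(c == d)) := by
  unfold PySem.Chars.splitOn
  exact go_head d (cs.length + 1) cs [] (by omega)

theorem replace_go_id (old new : List Char) : ∀ (fuel : Nat) (l acc : List Char), ¬ old <:+: l →
    PySem.Chars.replace.go old new fuel l acc = acc.reverse ++ l := by
  intro fuel
  induction fuel with
  | zero => intro l acc h; rw [PySem.Chars.replace.go]
  | succ n ih =>
    intro l acc h
    cases l with
    | nil => rw [PySem.Chars.replace.go] <;> simp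
    | cons c rest =>
      rw [PySem.Chars.replace.go]
      have hp : old.isPrefixOf (c :: rest) = false := by
        by_contra hcon
        have : old <+: (c :: rest) := List.isPrefixOf_iff_prefix.mp (by simpa using hcon)
        exact h this.isInfix
      rw [hp]
      simp only [Bool.false_eq_true, if_false]
      have hrest : ¬ old <:+: rest := by
        intro hi
        exact h (hi.trans (List.suffix_cons c rest).isInfix)
      rw [ih rest (c :: acc) hrest]
      simp

theorem replace_id (s old : List Char) (h : PySem.Chars.isIn old s = false) (hne : old ≠ []) :
    PySem.Chars.replace s old [] = s := by
  have hinf : ¬ old <:+: s := (PySem.Chars.isIn_eq_false_iff old s).mp h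
  unfold PySem.Chars.replace
  rw [if_neg (by simpa using hne)]
  simpa using replace_go_id old [] s.length s [] hinf

theorem find_single_mem (cs : List Char) (d : Char) (h : d ∈ cs) :
    PySem.Chars.find cs [d] = (cs.findIdx (· == d) : Int) := by
  have h0 : 0 ≤ PySem.Chars.find cs [d] :=
    (PySem.Chars.find_nonneg_iff cs [d]).mpr ((List.singleton_infix_iff d cs).mpr h)
  obtain ⟨hpre, hmin⟩ := PySem.Chars.find_spec h0
  set k := (PySem.Chars.find cs [d]).toNat with hk
  have hocc : cs[k]? = some d := by
    obtain ⟨t, ht⟩ := hpre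
    rw [← List.head?_drop, ← ht]; simp
  obtain ⟨hklt, hval⟩ := List.getElem?_eq_some_iff.mp hocc
  have hidx : cs.findIdx (· == d) = k := by
    apply (List.findIdx_eq hklt).mpr
    constructor
    · simpa using hval
    · intro j hj
      have hjlt : j < cs.length := by omega
      by_contra hcon
      simp only [Bool.not_eq_false, beq_iff_eq] at hcon
      have hpre2 : [d] <+: cs.drop j := by
        rw [List.drop_eq_getElem_cons hjlt, hcon]
        exact ⟨_, rfl⟩
      exact hmin j hj hpre2
  omega

theorem find_single_not_mem (cs : List Char) (d : Char) (h : ¬ d ∈ cs) :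
    PySem.Chars.find cs [d] = -1 := by
  exact (PySem.Chars.find_eq_neg_one_iff cs [d]).mpr (fun hi => h ((List.singleton_infix_iff d cs).mp hi))

theorem findIdx_or_eq_min (a b : Char → Bool) (l : List Char) :
    l.findIdx (fun c => a c || b c) = min (l.findIdx a) (l.findIdx b) := by
  induction l with
  | nil => simp
  | cons c t ih =>
    cases ha : a c <;> cases hb : b c <;>
      simp only [List.findIdx_cons, ha, hb, Bool.false_or, Bool.or_self, Bool.true_or,
        Bool.or_true, cond_false, cond_true] <;>
      omega

theorem take_findIdx_eq_takeWhile (p : Char → Bool) (l : List Char) :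
    l.take (l.findIdx p) = l.takeWhile (fun c => !p c) := by
  induction l with
  | nil => simp
  | cons c t ih =>
    simp only [List.findIdx_cons, List.takeWhile_cons]
    cases hc : p c <;> simp [ih]

theorem not_mem_of_isIn_false (cs : List Char) (d : Char) (h : PySem.Chars.isIn [d] cs = false) :
    d ∉ cs := fun hm => by
  have := (PySem.Chars.isIn_iff_infix [d] cs).mpr ((List.singleton_infix_iff d cs).mpr hm)
  rw [h] at this; exact Bool.noConfusion this

theorem isIn_takeWhile_ne (cs : List Char) (d : Char) :
    PySem.Chars.isIn [d] (cs.takeWhile (fun c => !(c == d))) = false := by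
  apply (PySem.Chars.isIn_eq_false_iff _ _).mpr
  intro hinf
  have hm := (List.singleton_infix_iff d _).mp hinf
  have := List.mem_takeWhile_imp hm
  simp at this

theorem cut_step (cs : List Char) (d : Char) :
    (if PySem.Chars.isIn [d] cs then pvSplitHead cs [d] else cs) = cs.takeWhile (fun c => !(c == d)) := by
  split_ifs with h
  · exact splitHead_single cs d
  · have := not_mem_of_isIn_false cs d (by simpa using h)
    refine (List.takeWhile_eq_self_iff.mpr ?_).symm
    intro x hx
    simp only [Bool.not_eq_eq_eq_not, Bool.not_true, beq_eq_false_iff_ne, ne_eq]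
    rintro rfl; exact this hx

theorem pipeLoop_eq (s : List Char) :
    pvPipeLoop (s.length + 1) s = s.takeWhile (fun c => !(c == '|')) := by
  by_cases h : PySem.Chars.isIn ['|'] s = true
  · have hm : '|' ∈ s := (List.singleton_infix_iff _ s).mp ((PySem.Chars.isIn_iff_infix _ s).mp h)
    have hne : s ≠ [] := by rintro rfl; simp at hm
    obtain ⟨m, hmaster⟩ : ∃ m, s.length = m + 1 :=
      ⟨s.length - 1, by cases s with | nil => exact absurd rfl hne | cons a t => simp⟩
    rw [hmaster]
    show pvPipeLoop (m + 1 + 1) s = _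
    rw [pvPipeLoop, if_pos h]
    have ht : pvSplitHead s ['|'] = s.takeWhile (fun c => !(c == '|')) := splitHead_single s '|'
    rw [ht]
    rw [pvPipeLoop, if_neg (by rw [isIn_takeWhile_ne]; exact Bool.noConfusion)]
  · rw [pvPipeLoop, if_neg h]
    have := not_mem_of_isIn_false s '|' (by simpa using h)
    refine (List.takeWhile_eq_self_iff.mpr ?_).symm
    intro x hx
    simp only [Bool.not_eq_eq_eq_not, Bool.not_true, beq_eq_false_iff_ne, ne_eq]
    rintro rfl; exact this hx

theorem rep_step (s w : List Char) (hw : w ≠ []) :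
    (if PySem.Chars.isIn w s then PySem.Chars.replace s w [] else s) = PySem.Chars.replace s w [] := by
  split_ifs with h
  · rfl
  · exact (replace_id s w (by simpa using h) hw).symm

theorem step_eq (cs : List Char) (d : Char) (m : Nat) (hm : m ≤ cs.length) :
    (if PySem.Chars.find cs [d] ≠ -1 ∧ PySem.Chars.find cs [d] < (m : Int) then PySem.Chars.find cs [d] else (m : Int))
    = ((min m (cs.findIdx (· == d)) : Nat) : Int) := by
  by_cases h : d ∈ cs
  · rw [find_single_mem cs d h]
    split_ifs with hc
    · have : cs.findIdx (· == d) < m := by exact_mod_cast hc.2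
      omega
    · push_neg at hc
      have h2 := List.findIdx_le_length (p := (· == d)) (xs := cs)
      by_cases hz : (cs.findIdx (· == d) : Int) = -1
      · omega
      · have := hc hz; omega
  · rw [find_single_not_mem cs d h]
    have hl : cs.findIdx (· == d) = cs.length := by
      apply List.findIdx_eq_length.mpr
      intro x hx
      simp only [beq_eq_false_iff_ne, ne_eq]
      rintro rfl; exact h hx
    rw [if_neg (by simp)]
    omega

theorem B_cut (cs : List Char) :
    ([':', '|', '#'].foldl (fun cut d =>
        let i := PySem.Chars.find cs [d]
        if i ≠ -1 ∧ i < cut then i else cut) (cs.length : Int))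
    = ((cs.findIdx (fun c => c == ':' || (c == '|' || c == '#')) : Nat) : Int) := by
  have l1 := List.findIdx_le_length (p := (· == ':')) (xs := cs)
  have l2 := List.findIdx_le_length (p := (· == '|')) (xs := cs)
  have l3 := List.findIdx_le_length (p := (· == '#')) (xs := cs)
  simp only [List.foldl]
  rw [step_eq cs ':' cs.length le_rfl]
  rw [step_eq cs '|' _ (by omega)]
  rw [step_eq cs '#' _ (by omega)]
  rw [findIdx_or_eq_min (· == ':') (fun c => c == '|' || c == '#') cs,
      findIdx_or_eq_min (· == '|') (· == '#') cs]
  omega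

theorem chain_eq (cs : List Char) :
    ((cs.takeWhile (fun c => !(c == ':'))).takeWhile (fun c => !(c == '|'))).takeWhile (fun c => !(c == '#'))
    = cs.takeWhile (fun c => !(c == ':' || (c == '|' || c == '#'))) := by
  rw [List.takeWhile_takeWhile, List.takeWhile_takeWhile]
  congr 1
  funext c
  cases h1 : c == ':' <;> cases h2 : c == '|' <;> cases h3 : c == '#' <;> simp [h1, h2, h3]

theorem pv_main (opening : String) : shorten_names opening = shorten_names_alt opening := by
  unfold shorten_names shorten_names_alt
  simp only [cut_step, pipeLoop_eq]
  rw [B_cut]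
  simp only [List.foldl]
  rw [rep_step _ _ (by decide), rep_step _ _ (by decide), rep_step _ _ (by decide)]
  rw [chain_eq]
  rw [PySem.Chars.slice_eq_listSlice, PySem.List.slice_to _ (Int.natCast_nonneg _)]
  rw [Int.toNat_natCast]
  rw [take_findIdx_eq_takeWhile]

-- ===== VERDICT (by name: the statement is the Claim_ definition above) =====
theorem shorten_names_spec : Claim_equal_shorten_names := by
  intro opening _
  exact pv_main opening
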